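-- pv_equiv track=rewrite | github.com/CITIZENDOT/CSS-Minifier | main.py | get_small_selectors
-- ===== SOURCE A (Python) =====
-- from math import log, ceil
-- import itertools
-- from string import ascii_lowercase
--
-- def get_small_selectors(selectors):
--     n = len(selectors)
--     if n == 0:
--         return {}
--     max_chars_in_selector = max(ceil(log(n, 26)), 1)
--     short_selectors = []
--     for i in range(1, max_chars_in_selector + 1):
--         tmp = ["".join(i) for i in itertools.product(ascii_lowercase, repeat=i)]
--         short_selectors.extend(tmp)
--     short_selectors = short_selectors[:n]
--
--     cls_map = {}
--     for i, selector in enumerate(selectors):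
--         cls_map[selector] = short_selectors[i]
--
--     return cls_map
-- ===== SOURCE B (Python) =====
-- def get_small_selectors(selectors):
--     cls_map = {}
--     for i, selector in enumerate(selectors):
--         num = i + 1
--         name = ""
--         while num:
--             num -= 1
--             name = chr(97 + num % 26) + name
--             num //= 26
--         cls_map[selector] = name
--     return cls_map
-- ===== Notes on version B (the rewrite author's own statement) =====
-- stated objective: simpler
-- what changed: Instead of materialising the whole base-26 name table with math.log/ceil and itertools.product and truncating it, B converts each index i+1 to its bijective base-26 name directly with a small per-element digit loop (no imports, no global table).
import Mathlib
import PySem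

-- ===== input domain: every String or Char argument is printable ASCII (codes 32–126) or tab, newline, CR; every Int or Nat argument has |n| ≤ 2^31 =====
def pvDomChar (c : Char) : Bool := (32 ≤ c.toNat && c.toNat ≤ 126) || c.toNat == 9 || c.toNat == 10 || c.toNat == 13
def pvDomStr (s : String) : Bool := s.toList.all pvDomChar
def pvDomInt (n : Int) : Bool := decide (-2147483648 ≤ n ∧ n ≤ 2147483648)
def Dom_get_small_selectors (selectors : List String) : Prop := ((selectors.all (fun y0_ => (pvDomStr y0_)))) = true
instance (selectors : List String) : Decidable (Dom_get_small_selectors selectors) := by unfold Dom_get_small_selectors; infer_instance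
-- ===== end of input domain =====

-- B replaces A's enumerate-all-base-26-names-and-truncate table with a direct per-index
-- bijective base-26 conversion (objective: simpler — no log/itertools, no global name table).

-- ===== PORT A =====
-- string.ascii_lowercase
def pvLetters : List Char := "abcdefghijklmnopqrstuvwxyz".toList

-- itertools.product(ascii_lowercase, repeat=k), each tuple kept as a list of chars
-- ("".join is applied at the use site, String.ofList below — exact, join of single chars)
def pvWords : Nat → List (List Char)
  | 0 => [[]]
  | k + 1 => pvLetters.flatMap (fun c => (pvWords k).map (fun w => c :: w))

-- the for-loop extending short_selectors for i in range(1, max_chars+1)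
def pvAllNames : Nat → List (List Char)
  | 0 => []
  | k + 1 => pvAllNames k ++ pvWords (k + 1)

-- max(ceil(log(n, 26)), 1), ported as the exact integer ⌈log_26 n⌉ (n ≥ 2), i.e. the
-- least k ≥ 1 with n ≤ 26^k, via ceil-division recursion. Exact for the RESULT of A:
-- any float-rounding surplus width in Python only adds names that [:n] truncates away.
def pvMaxChars (n : Nat) : Nat :=
  if n ≤ 26 then 1 else 1 + pvMaxChars ((n + 25) / 26)
termination_by n
decreasing_by exact Nat.div_lt_of_lt_mul (by omega)

-- for i, selector in enumerate(selectors): cls_map[selector] = short_selectors[i]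
-- (the index is always in range — proved below — so .getD [] is never taken)
def pvLoopA (shorts : List (List Char)) : List String → Nat → PySem.Dict String String → PySem.Dict String String
  | [], _, d => d
  | s :: rest, i, d =>
      pvLoopA shorts rest (i + 1) (d.insert s (String.ofList ((PySem.List.pyGet? shorts (i : Int)).getD [])))

def get_small_selectors (selectors : List String) : List (String × String) :=
  let n := selectors.length
  if n = 0 then []
  else
    let shorts := (pvAllNames (pvMaxChars n)).take n
    (pvLoopA shorts selectors 0 PySem.Dict.empty).items

-- ===== PORT B =====
-- the while-num loop: num -= 1; name = chr(97 + num % 26) + name; num //= 26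
-- (name built as a List Char, String.ofList applied once at the end — exact)
def pvNameLoop : Nat → List Char → List Char
  | 0, acc => acc
  | m + 1, acc => pvNameLoop (m / 26) (Char.ofNat (97 + m % 26) :: acc)
decreasing_by exact Nat.lt_succ_of_le (Nat.div_le_self m 26)

def pvLoopB : List String → Nat → PySem.Dict String String → PySem.Dict String String
  | [], _, d => d
  | s :: rest, i, d => pvLoopB rest (i + 1) (d.insert s (String.ofList (pvNameLoop (i + 1) [])))

def get_small_selectors_alt (selectors : List String) : List (String × String) :=
  (pvLoopB selectors 0 PySem.Dict.empty).items

-- ===== PRECONDITION & SPEC =====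
def Spec_get_small_selectors (selectors : List String) (out : List (String × String)) : Prop := out = get_small_selectors_alt selectors
instance (selectors : List String) (out : List (String × String)) : Decidable (Spec_get_small_selectors selectors out) := by unfold Spec_get_small_selectors; infer_instance

-- ===== CLAIM (what is proved, stated in full; the proofs are below) =====
def Claim_equal_get_small_selectors : Prop := ∀ (selectors : List String), Dom_get_small_selectors selectors → Spec_get_small_selectors selectors (get_small_selectors selectors)

-- ===== LEMMAS AND PROOFS =====

-- spec form of B's digit loop: digits appended most-significant-first
def pvNameRec : Nat → List Char
  | 0 => []
  | m + 1 => pvNameRec (m / 26) ++ [Char.ofNat (97 + m % 26)]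
decreasing_by exact Nat.lt_succ_of_le (Nat.div_le_self m 26)

lemma pvNameRec_succ (m : Nat) : pvNameRec (m + 1) = pvNameRec (m / 26) ++ [Char.ofNat (97 + m % 26)] := by
  rw [pvNameRec]

lemma pvNameLoop_eq (m : Nat) : ∀ acc, pvNameLoop m acc = pvNameRec m ++ acc := by
  induction m using Nat.strong_induction_on with
  | _ m ih =>
    match m with
    | 0 => intro acc; simp [pvNameLoop, pvNameRec]
    | m + 1 =>
      intro acc
      rw [pvNameLoop, pvNameRec, ih (m / 26) (Nat.lt_succ_of_le (Nat.div_le_self m 26))]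
      simp

-- number of names of width ≤ k
def pvS : Nat → Nat
  | 0 => 0
  | k + 1 => pvS k + 26 ^ (k + 1)

lemma pvS_succ (k : Nat) : pvS (k + 1) = 26 * (pvS k + 1) := by
  induction k with
  | zero => simp [pvS]
  | succ k ih =>
    have h1 : pvS (k + 1) = pvS k + 26 ^ (k + 1) := rfl
    have h2 : pvS (k + 1 + 1) = pvS (k + 1) + 26 ^ (k + 1 + 1) := rfl
    have h3 : (26 : Nat) ^ (k + 1 + 1) = 26 ^ (k + 1) * 26 := pow_succ 26 (k + 1)
    omega

lemma pvLetters_eq : pvLetters = (List.range 26).map (fun r => Char.ofNat (97 + r)) := by decide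

lemma pvLetters_get (t : Nat) (ht : t < 26) : pvLetters[t]? = some (Char.ofNat (97 + t)) := by
  rw [pvLetters_eq]
  simp [List.getElem?_map, List.getElem?_range ht]

lemma pvWords_length (k : Nat) : (pvWords k).length = 26 ^ k := by
  induction k with
  | zero => simp [pvWords]
  | succ k ih =>
    have hl : pvLetters.length = 26 := by decide
    rw [show pvWords (k + 1) = pvLetters.flatMap (fun c => (pvWords k).map (fun w => c :: w)) from rfl,
        List.length_flatMap]
    simp only [List.length_map, ih, List.map_const']
    rw [List.sum_replicate, hl, smul_eq_mul, pow_succ, Nat.mul_comm]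

lemma pvAllNames_length (k : Nat) : (pvAllNames k).length = pvS k := by
  induction k with
  | zero => simp [pvAllNames, pvS]
  | succ k ih => simp [pvAllNames, pvS, ih, pvWords_length]

lemma pvFlatMap_getElem?_uniform {α β : Type} (f : α → List β) (L : Nat) (hL : 0 < L)
    (hf : ∀ x, (f x).length = L) :
    ∀ (xs : List α) (t : Nat), (xs.flatMap f)[t]? = (xs[t / L]?).bind (fun x => (f x)[t % L]?) := by
  intro xs
  induction xs with
  | nil => intro t; simp
  | cons x xs ih =>
    intro t
    rw [List.flatMap_cons, List.getElem?_append]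
    by_cases h : t < L
    · rw [if_pos (by rw [hf]; exact h), Nat.div_eq_of_lt h, Nat.mod_eq_of_lt h]
      simp
    · rw [if_neg (by rw [hf]; omega), hf, ih (t - L)]
      have hr : t % L < L := Nat.mod_lt _ hL
      have hdm : L * (t / L) + t % L = t := Nat.div_add_mod t L
      have hq : 1 ≤ t / L := (Nat.one_le_div_iff hL).mpr (by omega)
      obtain ⟨q', hq'⟩ : ∃ q', t / L = q' + 1 := ⟨t / L - 1, by omega⟩
      rw [hq'] at hdm
      have hx : L * (q' + 1) = L * q' + L := by ring
      have hrep : t - L = t % L + L * q' := by omega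
      rw [hrep, Nat.add_mul_div_left _ _ hL, Nat.add_mul_mod_self_left,
          Nat.div_eq_of_lt hr, Nat.mod_eq_of_lt hr, hq', Nat.zero_add]
      rw [List.getElem?_cons_succ]

lemma pvWords_one : pvWords 1 = pvLetters.map (fun c => [c]) := by
  exact List.map_eq_flatMap.symm

lemma pvWords_snoc (k : Nat) :
    pvWords (k + 1) = (pvWords k).flatMap (fun w => pvLetters.map (fun c => w ++ [c])) := by
  induction k with
  | zero =>
    rw [pvWords_one, show pvWords 0 = [[]] from rfl]
    simp
  | succ k ih =>
    conv_rhs => rw [show pvWords (k + 1) = pvLetters.flatMap (fun c => (pvWords k).map (fun w => c :: w)) from rfl]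
    rw [show pvWords (k + 1 + 1) = pvLetters.flatMap (fun c => (pvWords (k + 1)).map (fun w => c :: w)) from rfl, ih]
    simp only [List.map_flatMap, List.flatMap_map, List.map_map, List.flatMap_assoc]
    simp [Function.comp_def]

lemma pvW (k : Nat) : ∀ t, t < 26 ^ (k + 1) →
    (pvWords (k + 1))[t]? = some (pvNameRec (pvS k + t + 1)) := by
  induction k with
  | zero =>
    intro t ht
    have ht' : t < 26 := by simpa using ht
    rw [pvWords_one, List.getElem?_map, pvLetters_get t ht']
    rw [show pvS 0 + t + 1 = t + 1 by simp [pvS]]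
    rw [pvNameRec, Nat.div_eq_of_lt ht', Nat.mod_eq_of_lt ht']
    simp [pvNameRec]
  | succ k ih =>
    intro t ht
    rw [pvWords_snoc (k + 1)]
    rw [pvFlatMap_getElem?_uniform (fun w => pvLetters.map (fun c => w ++ [c])) 26 (by omega)
        (by intro w; simp [pvLetters])]
    have hdivlt : t / 26 < 26 ^ (k + 1) := by
      rw [Nat.div_lt_iff_lt_mul (by omega)]
      calc t < 26 ^ (k + 1 + 1) := ht
        _ = 26 ^ (k + 1) * 26 := pow_succ 26 (k + 1)
    rw [ih (t / 26) hdivlt, Option.bind_some]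
    rw [List.getElem?_map, pvLetters_get (t % 26) (Nat.mod_lt _ (by omega))]
    have hS := pvS_succ k
    have harg : pvS (k + 1) + t + 1 = (26 * (pvS k + 1) + t) + 1 := by omega
    rw [harg, pvNameRec_succ (26 * (pvS k + 1) + t)]
    rw [Nat.mul_add_mod, Nat.mul_add_div (by omega)]
    rw [show pvS k + 1 + t / 26 = pvS k + t / 26 + 1 by omega]
    simp

-- allNames k lists exactly the names pvNameRec (j+1), j < pvS k, in order
lemma pvAN (k : Nat) : ∀ j, j < pvS k → (pvAllNames k)[j]? = some (pvNameRec (j + 1)) := by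
  induction k with
  | zero => intro j hj; simp [pvS] at hj
  | succ k ih =>
    intro j hj
    rw [show pvAllNames (k+1) = pvAllNames k ++ pvWords (k+1) from rfl,
        List.getElem?_append, pvAllNames_length]
    by_cases h : j < pvS k
    · rw [if_pos h]; exact ih j h
    · rw [if_neg h]
      have ht : j - pvS k < 26 ^ (k + 1) := by
        have : pvS (k + 1) = pvS k + 26 ^ (k + 1) := rfl
        omega
      rw [pvW k (j - pvS k) ht]
      congr 2
      omega

lemma pvMaxChars_pos (n : Nat) : 1 ≤ pvMaxChars n := by
  unfold pvMaxChars
  split <;> omega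

lemma pvMaxChars_ge (n : Nat) : n ≤ 26 ^ pvMaxChars n := by
  induction n using Nat.strong_induction_on with
  | _ n ih =>
    unfold pvMaxChars
    split
    · next h => simpa using h
    · next h =>
      have hlt : (n + 25) / 26 < n := Nat.div_lt_of_lt_mul (by omega)
      have hrec := ih ((n + 25) / 26) hlt
      have h26 : n ≤ 26 * ((n + 25) / 26) := by
        have := Nat.div_add_mod (n + 25) 26
        have := Nat.mod_lt (n + 25) (y := 26) (by omega)
        omega
      calc n ≤ 26 * ((n + 25) / 26) := h26
        _ ≤ 26 * 26 ^ pvMaxChars ((n + 25) / 26) := by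
            exact Nat.mul_le_mul_left _ hrec
        _ = 26 ^ (1 + pvMaxChars ((n + 25) / 26)) := by rw [pow_add, pow_one]

lemma pvPow_le_S (k : Nat) (hk : 1 ≤ k) : 26 ^ k ≤ pvS k := by
  match k, hk with
  | k + 1, _ => exact Nat.le_add_left _ _

lemma pvShorts_get (n i : Nat) (hi : i < n) :
    (PySem.List.pyGet? ((pvAllNames (pvMaxChars n)).take n) (i : Int)).getD [] = pvNameLoop (i + 1) [] := by
  rw [PySem.List.pyGet?_natCast, List.getElem?_take]
  have hin : i < pvS (pvMaxChars n) :=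
    lt_of_lt_of_le hi (le_trans (pvMaxChars_ge n) (pvPow_le_S _ (pvMaxChars_pos n)))
  rw [if_pos hi, pvAN _ i hin, pvNameLoop_eq]
  simp

lemma pvLoop_eq (shorts : List (List Char)) :
    ∀ (l : List String) (i : Nat) (d : PySem.Dict String String),
      (∀ j, i ≤ j → j < i + l.length →
        (PySem.List.pyGet? shorts (j : Int)).getD [] = pvNameLoop (j + 1) []) →
      pvLoopA shorts l i d = pvLoopB l i d := by
  intro l
  induction l with
  | nil => intro i d _; rfl
  | cons s rest ih =>
    intro i d h
    rw [pvLoopA, pvLoopB, h i (le_refl i) (by simp), ih (i + 1) _ (fun j h1 h2 => h j (by omega) (by simp at h2 ⊢; omega))]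

-- ===== VERDICT (by name: the statement is the Claim_ definition above) =====
theorem get_small_selectors_spec : Claim_equal_get_small_selectors := by
  unfold Claim_equal_get_small_selectors Spec_get_small_selectors
  intro selectors _
  unfold get_small_selectors get_small_selectors_alt
  by_cases h : selectors.length = 0
  · rw [if_pos h]
    match selectors, h with
    | [], _ => rfl
  · rw [if_neg h]
    exact congrArg (fun d => d.items)
      (pvLoop_eq _ selectors 0 PySem.Dict.empty
        (fun j h1 h2 => pvShorts_get selectors.length j (by omega)))
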